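-- pv_equiv track=rewrite | github.com/cristoslc/202602-workstation | scripts/raycast_to_espanso.py | icu_to_strftime
-- ===== SOURCE A (Python) =====
-- _ICU_TO_STRFTIME: list[tuple[str, str]] = [
--     ("MMMM", "%B"),   # Full month name
--     ("MMM", "%b"),    # Abbreviated month name
--     ("MM", "%m"),     # Zero-padded month number
--     ("EEEE", "%A"),   # Full weekday name
--     ("EEE", "%a"),    # Abbreviated weekday name
--     ("yyyy", "%Y"),   # 4-digit year
--     ("yy", "%y"),     # 2-digit year
--     ("dd", "%d"),     # Zero-padded day
--     ("HH", "%H"),     # 24-hour hour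
--     ("hh", "%I"),     # 12-hour hour
--     ("mm", "%M"),     # Minute
--     ("ss", "%S"),     # Second
--     ("a", "%p"),      # AM/PM
--     ("Z", "%z"),      # Timezone offset
-- ]
--
-- def icu_to_strftime(icu_format: str) -> str:
--     """Translate an ICU/Java date format string to Python strftime.
--
--     Handles quoted literals (e.g., ``'GMT'`` → ``GMT``), ICU tokens,
--     and passes through non-token characters (hyphens, spaces, colons).
--     """
--     result: list[str] = []
--     i = 0
--     while i < len(icu_format):
--         # Quoted literal: 'GMT' → GMT, '' → '
--         if icu_format[i] == "'":
--             end = icu_format.index("'", i + 1) if "'" in icu_format[i + 1:] else len(icu_format)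
--             literal = icu_format[i + 1:end]
--             # Escape any % in literals so strftime doesn't interpret them.
--             result.append(literal.replace("%", "%%"))
--             i = end + 1
--             continue
--
--         # Try each ICU token (longest-first).
--         matched = False
--         for token, code in _ICU_TO_STRFTIME:
--             if icu_format[i:i + len(token)] == token:
--                 result.append(code)
--                 i += len(token)
--                 matched = True
--                 break
--
--         if not matched:
--             # Pass through non-token characters (-, :, space, T, etc.).
--             ch = icu_format[i]
--             # Escape % so strftime doesn't choke on literal percent signs.
--             result.append("%%" if ch == "%" else ch)
--             i += 1
--
--     return "".join(result)
-- ===== SOURCE B (Python) =====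
-- # B: run-length algorithm — group the scan into maximal runs of one character and
-- # render each run greedily from a per-character table of (run-length, code) pairs,
-- # instead of trying all 14 tokens by prefix comparison at every position.
--
-- _RUN_CODES: dict[str, list[tuple[int, str]]] = {
--     "M": [(4, "%B"), (3, "%b"), (2, "%m")],
--     "E": [(4, "%A"), (3, "%a")],
--     "y": [(4, "%Y"), (2, "%y")],
--     "d": [(2, "%d")],
--     "H": [(2, "%H")],
--     "h": [(2, "%I")],
--     "m": [(2, "%M")],
--     "s": [(2, "%S")],
--     "a": [(1, "%p")],
--     "Z": [(1, "%z")],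
-- }
--
--
-- def _run_out(ch: str, k: int) -> str:
--     """Render a maximal run of k copies of ch: greedily consume the longest
--     table entry that still fits, then pass the remainder through (escaping %)."""
--     codes = _RUN_CODES.get(ch, [])
--     out: list[str] = []
--     while k:
--         for length, code in codes:
--             if length <= k:
--                 out.append(code)
--                 k -= length
--                 break
--         else:
--             break
--     out.append("%%" * k if ch == "%" else ch * k)
--     return "".join(out)
--
--
-- def icu_to_strftime(icu_format: str) -> str:
--     out: list[str] = []
--     i = 0
--     n = len(icu_format)
--     while i < n:
--         ch = icu_format[i]
--         if ch == "'":
--             j = icu_format.find("'", i + 1)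
--             if j < 0:
--                 j = n
--             out.append(icu_format[i + 1:j].replace("%", "%%"))
--             i = j + 1
--         else:
--             j = i + 1
--             while j < n and icu_format[j] == ch:
--                 j += 1
--             out.append(_run_out(ch, j - i))
--             i = j
--     return "".join(out)
-- ===== Notes on version B (the rewrite author's own statement) =====
-- stated objective: faster
-- what changed: A tries all 14 ICU tokens by prefix comparison at every position; B groups the scan into maximal runs of one character and renders each run greedily from a tiny per-character (run-length, code) table, passing the unconsumed remainder through.
import Mathlib
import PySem

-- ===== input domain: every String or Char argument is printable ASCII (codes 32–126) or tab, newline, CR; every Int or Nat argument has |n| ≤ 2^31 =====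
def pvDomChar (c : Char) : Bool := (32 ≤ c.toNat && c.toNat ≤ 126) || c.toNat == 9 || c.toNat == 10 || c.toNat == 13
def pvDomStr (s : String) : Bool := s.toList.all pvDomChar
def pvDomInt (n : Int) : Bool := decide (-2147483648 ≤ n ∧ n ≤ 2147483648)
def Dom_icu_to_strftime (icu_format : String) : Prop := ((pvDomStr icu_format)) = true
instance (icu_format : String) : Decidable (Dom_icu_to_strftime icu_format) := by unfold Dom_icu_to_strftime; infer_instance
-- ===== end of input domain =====

-- B replaces A's per-position prefix search over the 14-token table by a run-length
-- algorithm: maximal runs of one character are rendered greedily from a per-character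
-- (run-length, code) table; objective: faster (measured).

-- ===== PORT A =====

-- _ICU_TO_STRFTIME (module constant)
def pvIcuTable : List (List Char × List Char) :=
  [(['M','M','M','M'], ['%','B']), (['M','M','M'], ['%','b']), (['M','M'], ['%','m']),
   (['E','E','E','E'], ['%','A']), (['E','E','E'], ['%','a']),
   (['y','y','y','y'], ['%','Y']), (['y','y'], ['%','y']),
   (['d','d'], ['%','d']), (['H','H'], ['%','H']), (['h','h'], ['%','I']),
   (['m','m'], ['%','M']), (['s','s'], ['%','S']),
   (['a'], ['%','p']), (['Z'], ['%','z'])]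

-- every table token is nonempty (termination of pvARun)
theorem pvIcuTable_pos : ∀ x ∈ pvIcuTable, 0 < x.1.length := by simp [pvIcuTable]

-- literal.replace("%", "%%"): hand port of str.replace, exact for the 1-char pattern "%"
def pvAEsc (cs : List Char) : List Char :=
  cs.flatMap (fun c => if c = '%' then ['%', '%'] else [c])

-- the while-loop of A over the remaining characters; the quote branch computes
-- end = next "'" (or len) via takeWhile and resumes after it (drop past len gives []),
-- the token branch is the for-loop over _ICU_TO_STRFTIME (first match = find?)
def pvARun : List Char → List Char
  | [] => []
  | c :: rest =>
    if c = '\'' then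
      let lit := rest.takeWhile (· ≠ '\'')
      pvAEsc lit ++ pvARun (rest.drop (lit.length + 1))
    else
      match h : pvIcuTable.find? (fun p => p.1.isPrefixOf (c :: rest)) with
      | some p => p.2 ++ pvARun ((c :: rest).drop p.1.length)
      | none => (if c = '%' then ['%', '%'] else [c]) ++ pvARun rest
termination_by cs => cs.length
decreasing_by
  · simp
  · have := pvIcuTable_pos _ (List.mem_of_find?_eq_some h)
    simp; omega
  · simp

def icu_to_strftime (icu_format : String) : String :=
  String.ofList (pvARun icu_format.toList)

-- ===== PORT B =====

-- _RUN_CODES: per character, the applicable (run-length, code) pairs, longest first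
def pvRunCodes (c : Char) : List (Nat × List Char) :=
  if c = 'M' then [(4, ['%','B']), (3, ['%','b']), (2, ['%','m'])]
  else if c = 'E' then [(4, ['%','A']), (3, ['%','a'])]
  else if c = 'y' then [(4, ['%','Y']), (2, ['%','y'])]
  else if c = 'd' then [(2, ['%','d'])]
  else if c = 'H' then [(2, ['%','H'])]
  else if c = 'h' then [(2, ['%','I'])]
  else if c = 'm' then [(2, ['%','M'])]
  else if c = 's' then [(2, ['%','S'])]
  else if c = 'a' then [(1, ['%','p'])]
  else if c = 'Z' then [(1, ['%','z'])]
  else []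

-- every run length in the table is positive (termination of pvGreedy)
theorem pvRunCodes_pos (c : Char) : ∀ q ∈ pvRunCodes c, 0 < q.1 := by
  unfold pvRunCodes; split_ifs <;> simp

-- the while-loop of _run_out: greedily consume the longest entry that still fits,
-- returning the rendered codes and the unconsumed remainder of the run
def pvGreedy (c : Char) : Nat → List Char × Nat
  | 0 => ([], 0)
  | (k+1) =>
    match h : (pvRunCodes c).find? (fun q => decide (q.1 ≤ k+1)) with
    | some q =>
      let r := pvGreedy c (k+1 - q.1)
      (q.2 ++ r.1, r.2)
    | none => ([], k+1)
termination_by k => k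
decreasing_by
  have := pvRunCodes_pos c _ (List.mem_of_find?_eq_some h)
  omega

-- _run_out: the greedy codes, then the leftover characters passed through ('%' escaped)
def pvRunOut (c : Char) (k : Nat) : List Char :=
  let r := pvGreedy c k
  r.1 ++ (if c = '%' then (List.replicate r.2 ['%','%']).flatten else List.replicate r.2 c)

-- _escape of a quoted literal: join of the per-character comprehension
def pvBEsc (cs : List Char) : List Char :=
  cs.flatMap (fun ch => if ch = '%' then ['%', '%'] else [ch])

-- the main while-loop of B: a quoted literal, or a maximal run of one character
def pvBLoop : List Char → List Char
  | [] => []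
  | c :: rest =>
    if c = '\'' then
      let lit := rest.takeWhile (· ≠ '\'')
      pvBEsc lit ++ pvBLoop (rest.drop (lit.length + 1))
    else
      let run := rest.takeWhile (· == c)
      pvRunOut c (run.length + 1) ++ pvBLoop (rest.drop run.length)
termination_by cs => cs.length
decreasing_by
  · simp
  · simp

def icu_to_strftime_alt (icu_format : String) : String :=
  String.ofList (pvBLoop icu_format.toList)

-- ===== PRECONDITION & SPEC =====
def Spec_icu_to_strftime (icu_format : String) (out : String) : Prop := out = icu_to_strftime_alt icu_format
instance (icu_format : String) (out : String) : Decidable (Spec_icu_to_strftime icu_format out) := by unfold Spec_icu_to_strftime; infer_instance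

-- ===== CLAIM (what is proved, stated in full; the proofs are below) =====
def Claim_equal_icu_to_strftime : Prop := ∀ (icu_format : String), Dom_icu_to_strftime icu_format → Spec_icu_to_strftime icu_format (icu_to_strftime icu_format)

-- ===== LEMMAS AND PROOFS =====

-- a nonempty uniform token is a prefix of a maximal run iff it is the run's character and fits
theorem pvPrefRep (a c : Char) (tail : List Char) (ht : tail.head? ≠ some c) :
    ∀ (L k : Nat), 0 < L → 0 < k →
      (List.replicate L a).isPrefixOf (List.replicate k c ++ tail) = decide (a = c ∧ L ≤ k) := by
  intro L
  induction L with
  | zero => intro k h; omega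
  | succ L ih =>
    intro k _ hk
    match k with
    | k'+1 =>
      simp only [List.replicate_succ, List.cons_append, List.isPrefixOf]
      by_cases hac : a = c
      · subst hac
        simp only [BEq.rfl, Bool.true_and]
        match L with
        | 0 => simp
        | L'+1 =>
          match k' with
          | 0 =>
            simp only [List.replicate, List.nil_append]
            cases tail with
            | nil => simp
            | cons t ts =>
              have htc : t ≠ a := by intro h; apply ht; simp [h]
              simp [List.isPrefixOf, Ne.symm htc]
          | k''+1 =>
            rw [ih (k''+1) (by omega) (by omega)]
            simp
      · have : (a == c) = false := by simp [hac]
        simp [this, hac]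

-- find? only looks at the predicate's values
theorem pvFind?_congr {α : Type} (l : List α) (f g : α → Bool) (h : ∀ x ∈ l, f x = g x) :
    l.find? f = l.find? g := by
  induction l with
  | nil => rfl
  | cons x xs ih =>
    rw [List.find?_cons, List.find?_cons, h x (by simp)]
    cases hg : g x <;> simp [ih (fun y hy => h y (by simp [hy]))]

-- each table token is a nonempty run of its own first character
theorem pvIcuTable_uniform :
    ∀ p ∈ pvIcuTable, p.1 = List.replicate p.1.length (p.1.headD 'Q') ∧ 0 < p.1.length := by
  decide

-- A's table search on a maximal run = B's greedy table lookup
set_option maxHeartbeats 2000000 in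
theorem pvFindRep (c : Char) (tail : List Char) (ht : tail.head? ≠ some c)
    (k : Nat) (hk : 0 < k) :
    pvIcuTable.find? (fun p => p.1.isPrefixOf (List.replicate k c ++ tail)) =
      ((pvRunCodes c).find? (fun q => decide (q.1 ≤ k))).map
        (fun q => (List.replicate q.1 c, q.2)) := by
  rw [pvFind?_congr pvIcuTable _ (fun p => decide (p.1.headD 'Q' = c ∧ p.1.length ≤ k))
      (by
        intro p hp
        obtain ⟨hrep, hpos⟩ := pvIcuTable_uniform p hp
        conv_lhs => rw [hrep]
        exact pvPrefRep (p.1.headD 'Q') c tail ht p.1.length k hpos hk)]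
  by_cases hM : c = 'M'
  · subst hM
    by_cases h4 : 4 ≤ k <;> by_cases h3 : 3 ≤ k <;> by_cases h2 : 2 ≤ k <;>
      first | omega | simp [pvIcuTable, pvRunCodes, List.find?, h4, h3, h2]
  by_cases hE : c = 'E'
  · subst hE
    by_cases h4 : 4 ≤ k <;> by_cases h3 : 3 ≤ k <;>
      first | omega | simp [pvIcuTable, pvRunCodes, List.find?, h4, h3]
  by_cases hy : c = 'y'
  · subst hy
    by_cases h4 : 4 ≤ k <;> by_cases h2 : 2 ≤ k <;>
      first | omega | simp [pvIcuTable, pvRunCodes, List.find?, h4, h2]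
  by_cases hdx : c = 'd'
  · subst hdx
    by_cases h2 : 2 ≤ k <;> simp [pvIcuTable, pvRunCodes, List.find?, h2]
  by_cases hHx : c = 'H'
  · subst hHx
    by_cases h2 : 2 ≤ k <;> simp [pvIcuTable, pvRunCodes, List.find?, h2]
  by_cases hhx : c = 'h'
  · subst hhx
    by_cases h2 : 2 ≤ k <;> simp [pvIcuTable, pvRunCodes, List.find?, h2]
  by_cases hmx : c = 'm'
  · subst hmx
    by_cases h2 : 2 ≤ k <;> simp [pvIcuTable, pvRunCodes, List.find?, h2]
  by_cases hsx : c = 's'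
  · subst hsx
    by_cases h2 : 2 ≤ k <;> simp [pvIcuTable, pvRunCodes, List.find?, h2]
  by_cases hax : c = 'a'
  · subst hax
    have h1 : 1 ≤ k := hk
    simp [pvIcuTable, pvRunCodes, List.find?, h1]
  by_cases hZx : c = 'Z'
  · subst hZx
    have h1 : 1 ≤ k := hk
    simp [pvIcuTable, pvRunCodes, List.find?, h1]
  simp [pvIcuTable, pvRunCodes, List.find?, Ne.symm hM, Ne.symm hE, Ne.symm hy,
        Ne.symm hdx, Ne.symm hHx, Ne.symm hhx, Ne.symm hmx, Ne.symm hsx, Ne.symm hax, Ne.symm hZx,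
        hM, hE, hy, hdx, hHx, hhx, hmx, hsx, hax, hZx]

-- resolved unfolding equations
theorem pvARun_nil : pvARun [] = [] := by rw [pvARun]

theorem pvBLoop_nil : pvBLoop [] = [] := by rw [pvBLoop]

theorem pvARun_quote (rest : List Char) :
    pvARun ('\'' :: rest) =
      pvAEsc (rest.takeWhile (· ≠ '\'')) ++
        pvARun (rest.drop ((rest.takeWhile (· ≠ '\'')).length + 1)) := by
  rw [pvARun]; simp

theorem pvBLoop_quote (rest : List Char) :
    pvBLoop ('\'' :: rest) =
      pvBEsc (rest.takeWhile (· ≠ '\'')) ++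
        pvBLoop (rest.drop ((rest.takeWhile (· ≠ '\'')).length + 1)) := by
  rw [pvBLoop]; simp

theorem pvBLoop_run (c : Char) (rest : List Char) (hc : c ≠ '\'') :
    pvBLoop (c :: rest) =
      pvRunOut c ((rest.takeWhile (· == c)).length + 1) ++
        pvBLoop (rest.drop (rest.takeWhile (· == c)).length) := by
  rw [pvBLoop, if_neg hc]

theorem pvARun_cons_some (c : Char) (rest : List Char) (p : List Char × List Char)
    (hc : c ≠ '\'') (h : pvIcuTable.find? (fun p => p.1.isPrefixOf (c :: rest)) = some p) :
    pvARun (c :: rest) = p.2 ++ pvARun ((c :: rest).drop p.1.length) := by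
  rw [pvARun, if_neg hc]
  split
  · rename_i p' heq
    rw [h] at heq
    injection heq with heq
    subst heq; rfl
  · rename_i heq
    rw [h] at heq
    cases heq

theorem pvARun_cons_none (c : Char) (rest : List Char)
    (hc : c ≠ '\'') (h : pvIcuTable.find? (fun p => p.1.isPrefixOf (c :: rest)) = none) :
    pvARun (c :: rest) = (if c = '%' then ['%', '%'] else [c]) ++ pvARun rest := by
  rw [pvARun, if_neg hc]
  split
  · rename_i p' heq
    rw [h] at heq
    cases heq
  · rfl

theorem pvGreedy_zero (c : Char) : pvGreedy c 0 = ([], 0) := by rw [pvGreedy]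

theorem pvGreedy_succ_some (c : Char) (k : Nat) (q : Nat × List Char)
    (h : (pvRunCodes c).find? (fun q => decide (q.1 ≤ k+1)) = some q) :
    pvGreedy c (k+1) = (q.2 ++ (pvGreedy c (k+1 - q.1)).1, (pvGreedy c (k+1 - q.1)).2) := by
  rw [pvGreedy]
  split
  · rename_i q' heq
    rw [h] at heq
    injection heq with heq
    subst heq; rfl
  · rename_i heq
    rw [h] at heq
    cases heq

theorem pvGreedy_succ_none (c : Char) (k : Nat)
    (h : (pvRunCodes c).find? (fun q => decide (q.1 ≤ k+1)) = none) :
    pvGreedy c (k+1) = ([], k+1) := by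
  rw [pvGreedy]
  split
  · rename_i q' heq
    rw [h] at heq
    cases heq
  · rfl

-- pvRunOut in the two find? cases
theorem pvRunOut_zero (c : Char) : pvRunOut c 0 = [] := by
  unfold pvRunOut
  rw [pvGreedy_zero]
  simp

theorem pvRunOut_some (c : Char) (k : Nat) (q : Nat × List Char)
    (h : (pvRunCodes c).find? (fun q => decide (q.1 ≤ k+1)) = some q) :
    pvRunOut c (k+1) = q.2 ++ pvRunOut c (k+1 - q.1) := by
  unfold pvRunOut
  rw [pvGreedy_succ_some c k q h]
  simp

theorem pvRunOut_none (c : Char) (k : Nat)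
    (h : (pvRunCodes c).find? (fun q => decide (q.1 ≤ k+1)) = none) :
    pvRunOut c (k+1) = (if c = '%' then ['%','%'] else [c]) ++ pvRunOut c k := by
  unfold pvRunOut
  rw [pvGreedy_succ_none c k h]
  cases k with
  | zero =>
    rw [pvGreedy_zero]
    by_cases hp : c = '%' <;> simp [hp, List.replicate_succ]
  | succ k' =>
    have h' : (pvRunCodes c).find? (fun q => decide (q.1 ≤ k'+1)) = none := by
      rw [List.find?_eq_none] at h ⊢
      intro x hx hle
      exact h x hx (by simp at hle ⊢; omega)
    rw [pvGreedy_succ_none c k' h']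
    by_cases hp : c = '%' <;> simp [hp, List.replicate_succ]

-- A consumes a maximal run exactly as B's _run_out renders it
theorem pvRunA (c : Char) (tail : List Char) (hc : c ≠ '\'') (ht : tail.head? ≠ some c) :
    ∀ k, 0 < k → pvARun (List.replicate k c ++ tail) = pvRunOut c k ++ pvARun tail := by
  intro k
  induction k using Nat.strong_induction_on with
  | _ k IH =>
    intro hk
    match k, hk with
    | k'+1, _ =>
      have hcons : List.replicate (k'+1) c ++ tail = c :: (List.replicate k' c ++ tail) := by
        simp [List.replicate_succ]
      have hfind := pvFindRep c tail ht (k'+1) (by omega)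
      cases hB : (pvRunCodes c).find? (fun q => decide (q.1 ≤ k'+1)) with
      | some q =>
        rw [hB] at hfind
        simp only [Option.map_some] at hfind
        have hq1 : q.1 ≤ k'+1 := by
          have := List.find?_some hB
          simpa using this
        rw [hcons] at hfind ⊢
        rw [pvARun_cons_some c _ _ hc hfind]
        rw [← hcons]
        have hdrop : (List.replicate (k'+1) c ++ tail).drop (List.replicate q.1 c).length =
            List.replicate (k'+1 - q.1) c ++ tail := by
          rw [List.length_replicate,
              List.drop_append_of_le_length (by simp [hq1]), List.drop_replicate]
        simp only [hdrop]
        rw [pvRunOut_some c k' q hB, List.append_assoc]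
        congr 1
        cases hz : k'+1 - q.1 with
        | zero => simp [pvRunOut_zero]
        | succ m =>
          rw [← hz]
          exact IH (k'+1 - q.1) (by have := pvRunCodes_pos c q (List.mem_of_find?_eq_some hB); omega) (by omega)
      | none =>
        rw [hB] at hfind
        simp only [Option.map_none] at hfind
        rw [hcons] at hfind ⊢
        rw [pvARun_cons_none c _ hc hfind]
        rw [pvRunOut_none c k' hB, List.append_assoc]
        congr 1
        cases k' with
        | zero => simp [pvRunOut_zero]
        | succ m => exact IH (m+1) (by omega) (by omega)

-- drop by the takeWhile length = dropWhile
theorem pvDropLen (p : Char → Bool) : ∀ l : List Char, l.drop (l.takeWhile p).length = l.dropWhile p := by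
  intro l
  induction l with
  | nil => rfl
  | cons x xs ih =>
    by_cases hx : p x
    · simp [List.takeWhile_cons, List.dropWhile_cons, hx, ih]
    · simp [List.takeWhile_cons, List.dropWhile_cons, hx]

-- the head of a non-empty dropWhile fails the predicate
theorem pvDropWhile_head (p : Char → Bool) :
    ∀ (l : List Char) (d : Char) (r : List Char), l.dropWhile p = d :: r → p d = false := by
  intro l
  induction l with
  | nil => intro d r h; cases h
  | cons x xs ih =>
    intro d r h
    rw [List.dropWhile_cons] at h
    by_cases hx : p x
    · rw [if_pos hx] at h; exact ih d r h
    · rw [if_neg hx] at h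
      injection h with h1 _
      subst h1
      simpa using hx

-- the bridge: A's per-position scan = B's run-length scan
theorem pvBridge : ∀ (n : Nat) (cs : List Char), cs.length ≤ n → pvARun cs = pvBLoop cs := by
  intro n
  induction n with
  | zero =>
    intro cs h
    have h0 : cs = [] := List.eq_nil_of_length_eq_zero (Nat.le_zero.mp h)
    subst h0
    rw [pvARun_nil, pvBLoop_nil]
  | succ n IH =>
    intro cs hlen
    match cs with
    | [] => rw [pvARun_nil, pvBLoop_nil]
    | c :: rest =>
      simp only [List.length_cons] at hlen
      by_cases hc : c = '\''
      · subst hc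
        rw [pvARun_quote, pvBLoop_quote]
        have : pvAEsc (rest.takeWhile (· ≠ '\'')) = pvBEsc (rest.takeWhile (· ≠ '\'')) := rfl
        rw [this]
        congr 1
        apply IH
        simp only [List.length_drop]
        omega
      · rw [pvBLoop_run c rest hc]
        have hdecomp : c :: rest =
            List.replicate ((rest.takeWhile (· == c)).length + 1) c ++ rest.dropWhile (· == c) := by
          have hrun : rest.takeWhile (· == c) =
              List.replicate (rest.takeWhile (· == c)).length c := by
            rw [List.eq_replicate_iff]
            exact ⟨rfl, fun b hb => by simpa using List.mem_takeWhile_imp hb⟩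
          calc c :: rest
              = c :: (rest.takeWhile (· == c) ++ rest.dropWhile (· == c)) := by
                rw [List.takeWhile_append_dropWhile]
            _ = _ := by
                rw [List.replicate_succ, List.cons_append]
                congr 1
                rw [← hrun]
        have hht : (rest.dropWhile (· == c)).head? ≠ some c := by
          cases hd : rest.dropWhile (· == c) with
          | nil => simp
          | cons d r =>
            have := pvDropWhile_head _ rest d r hd
            simp at this ⊢
            intro h
            exact this h
        conv_lhs => rw [hdecomp]
        rw [pvRunA c (rest.dropWhile (· == c)) hc hht _ (by omega)]
        congr 1
        rw [pvDropLen]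
        apply IH
        have hle : (rest.dropWhile (· == c)).length ≤ rest.length := List.length_dropWhile_le _ _
        omega

-- ===== VERDICT (by name: the statement is the Claim_ definition above) =====
theorem icu_to_strftime_spec : Claim_equal_icu_to_strftime := by
  intro s _
  unfold Spec_icu_to_strftime icu_to_strftime icu_to_strftime_alt
  exact congrArg String.ofList (pvBridge s.toList.length s.toList le_rfl)
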